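-- pv_equiv track=rewrite | github.com/DhananjoyBhuyan/Typo-Detection | typo_detection.py | check_typos
-- ===== SOURCE A (Python) =====
-- from typing import List, Optional
--
-- def is_typo(string1: str, string2: str) -> (bool, Optional[str]):
--     def typo_detect(string: str, typo: str) -> (bool, Optional[str]):
--         string = string.lower()
--         typo = typo.lower()
--         """
--         Checks if the second string argument is a typo of the first.
--
--         Parameters
--         ----------
--         string : str
--             The main correct string
--         typo : str
--             The typo
--
--         Returns
--         -------
--         bool, Optional[str]
--             True, corrected word if it's a typo of a string else False.
--
--         """
--         if string == typo:
--             return True, string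
--
--         l1, l2 = len(string), len(typo)
--
--         if l1 == l2:
--             # Case 1: One character is swapped (i.e., only one mismatch)
--             diff = [c for c, c2 in zip(typo, string) if c != c2]
--             if len(diff) == 1:
--
--                 typo = list(typo)
--                 for i in range(len(typo)):
--                     o = typo[i]
--                     typo[i] = string[i]
--                     if ''.join(typo) == string:
--                         return True, string
--                     typo[i] = o
--
--             # Case 2: Two adjacent characters flipped
--             elif len(diff) == 2:
--                 for i in range(len(typo) - 1):
--                     flipped = typo[i:i + 2][::-1]
--                     if ''.join(flipped) == string[i:i + 2]:
--                         return True, string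
--
--         elif l1 == l2 + 1:
--             # Case 3: One extra character in 'string'
--             for i in range(len(typo) + 1):
--                 if string[:i] + string[i+1:] == typo:
--                     return True, string
--
--         elif l1 == l2 + 2:
--             # Case 4: Two extra characters in 'string'
--             for i in range(len(typo) + 1):
--                 if string[:i] + string[i+2:] == typo:
--                     return True, string
--
--         return False
--     return typo_detect(string1, string2) or typo_detect(string2, string1)
--
-- def check_typos(pairs: List[tuple[str, str]]) -> tuple[List[bool], List[str]]:
--     """
--
--
--     Parameters
--     ----------
--     pairs : List[tuple[str, str]]
--         pairs of compare.
--         These pairs should have the correct string as first element and the given typo as the second.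
--
--     Returns
--     -------
--     (tuple[List[bool], List[str]])
--         List of bools, True for is_typo and False for not is_typo.
--         List of corrected words.
--     """
--     typo_bool = []
--     correct_words = []
--     for w, t in pairs:
--         if is_typo(w, t):
--             typo_bool.append(True)
--             correct_words.append(w)
--         else:
--             typo_bool.append(False)
--             correct_words.append(None)
--     return typo_bool, correct_words
-- ===== SOURCE B (Python) =====
-- from typing import List, Optional
--
--
-- def _one_edit(a: str, b: str) -> bool:
--     """Linear check: a and b (already lowercased) are equal, differ by one
--     substitution, by an adjacent-looking transposition window, or by deleting
--     one or two adjacent characters from the longer one."""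
--     la, lb = len(a), len(b)
--     if la == lb:
--         if a == b:
--             return True
--         mism = [i for i in range(la) if a[i] != b[i]]
--         if len(mism) == 1:
--             return True
--         if len(mism) == 2:
--             return any(b[i] == a[i + 1] and b[i + 1] == a[i] for i in range(la - 1))
--         return False
--     if la < lb:
--         a, b, la, lb = b, a, lb, la
--     k = la - lb
--     if k > 2:
--         return False
--     p = 0
--     while p < lb and a[p] == b[p]:
--         p += 1
--     return a[p + k:] == b[p:]
--
--
-- def check_typos(pairs: List[tuple]) -> tuple:
--     flags = [_one_edit(w.lower(), t.lower()) for w, t in pairs]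
--     words = [w if f else None for (w, _), f in zip(pairs, flags)]
--     return flags, words
-- ===== Notes on version B (the rewrite author's own statement) =====
-- stated objective: alternative
-- what changed: Per pair, A rebuilds candidate strings in loops (try every substitution position, every deletion position, every 2-slice reversal) and tries both argument orders; B does one direct pass per pair: it counts mismatch positions for equal lengths, scans once for a transposition window, and for length difference 1 or 2 matches the common prefix and compares the remaining suffix.
import Mathlib
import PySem

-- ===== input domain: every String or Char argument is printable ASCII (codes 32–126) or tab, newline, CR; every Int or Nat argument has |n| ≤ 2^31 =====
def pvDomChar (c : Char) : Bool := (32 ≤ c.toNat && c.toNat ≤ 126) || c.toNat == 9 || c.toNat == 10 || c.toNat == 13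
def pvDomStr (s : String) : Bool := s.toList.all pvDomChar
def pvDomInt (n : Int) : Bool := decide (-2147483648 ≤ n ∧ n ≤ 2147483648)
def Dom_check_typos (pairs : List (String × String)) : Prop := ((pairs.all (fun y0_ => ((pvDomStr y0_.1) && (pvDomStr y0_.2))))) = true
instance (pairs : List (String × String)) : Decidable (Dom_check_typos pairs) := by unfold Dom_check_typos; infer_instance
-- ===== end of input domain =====

-- B replaces A's per-pair candidate-rebuilding loops by a single direct pass per pair
-- (mismatch positions / prefix-match-then-suffix-compare); same results (alternative
-- algorithm; not measured faster on the generated inputs).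


-- ===== PORT A =====
-- typo_detect's body after the two `.lower()` calls; `string`/`typo` are `s`/`t`.
-- Python returns `(True, string)` or `False`; check_typos only tests truthiness (the
-- appended corrected word is the ORIGINAL pair element), so the port returns Bool.
-- range(n) over naturals is List.range n; the in-range slices s[:i], s[i+k:], t[i:i+2],
-- [::-1] are take/drop/reverse (exact: Python clamps nonnegative slice bounds exactly
-- like take/drop); the case-1 loop writes typo[i] = string[i], compares, and restores,
-- i.e. each iteration tests `t.set i s[i] == s`.
def pvTdCore (s t : List Char) : Bool :=
  if s = t then true
  else
    let l1 := s.length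
    let l2 := t.length
    if l1 = l2 then
      let diff := (t.zip s).filter (fun p => p.1 != p.2)
      if diff.length = 1 then
        (List.range t.length).any (fun i => t.set i (s.getD i ' ') == s)
      else if diff.length = 2 then
        (List.range (t.length - 1)).any (fun i =>
          ((t.drop i).take 2).reverse == (s.drop i).take 2)
      else false
    else if l1 = l2 + 1 then
      (List.range (t.length + 1)).any (fun i => s.take i ++ s.drop (i + 1) == t)
    else if l1 = l2 + 2 then
      (List.range (t.length + 1)).any (fun i => s.take i ++ s.drop (i + 2) == t)
    else false

def pvTypoDetect (string typo : String) : Bool :=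
  pvTdCore (PySem.Chars.lower string.toList) (PySem.Chars.lower typo.toList)

-- `typo_detect(s1, s2) or typo_detect(s2, s1)` used only for truthiness
def pvIsTypo (string1 string2 : String) : Bool :=
  pvTypoDetect string1 string2 || pvTypoDetect string2 string1

def check_typos (pairs : List (String × String)) : List Bool × List (Option String) :=
  pairs.foldl
    (fun acc wt =>
      if pvIsTypo wt.1 wt.2 then (acc.1 ++ [true], acc.2 ++ [some wt.1])
      else (acc.1 ++ [false], acc.2 ++ [none]))
    ([], [])

-- ===== PORT B =====
-- the `while p < lb and a[p] == b[p]: p += 1` scan of Source B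
def pvPrefLen (a b : List Char) : Nat :=
  match a, b with
  | x :: a', y :: b' => if x = y then pvPrefLen a' b' + 1 else 0
  | _, _ => 0

def pvOneEdit (a b : List Char) : Bool :=
  if a.length = b.length then
    if a = b then true
    else
      let mism := (List.range a.length).filter (fun i => a.getD i ' ' != b.getD i ' ')
      if mism.length = 1 then true
      else if mism.length = 2 then
        (List.range (a.length - 1)).any (fun i =>
          b.getD i ' ' == a.getD (i + 1) ' ' && b.getD (i + 1) ' ' == a.getD i ' ')
      else false
  else
    let ab := if a.length < b.length then (b, a) else (a, b)
    let k := ab.1.length - ab.2.length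
    if 2 < k then false
    else
      let p := pvPrefLen ab.1 ab.2
      ab.1.drop (p + k) == ab.2.drop p

def check_typos_alt (pairs : List (String × String)) : List Bool × List (Option String) :=
  let flags := pairs.map (fun wt =>
    pvOneEdit (PySem.Chars.lower wt.1.toList) (PySem.Chars.lower wt.2.toList))
  let words := (pairs.zip flags).map (fun pf => if pf.2 then some pf.1.1 else none)
  (flags, words)

-- ===== PRECONDITION & SPEC =====
def Spec_check_typos (pairs : List (String × String)) (out : List Bool × List (Option String)) : Prop := out = check_typos_alt pairs
instance (pairs : List (String × String)) (out : List Bool × List (Option String)) : Decidable (Spec_check_typos pairs out) := by unfold Spec_check_typos; infer_instance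

-- ===== CLAIM (what is proved, stated in full; the proofs are below) =====
def Claim_equal_check_typos : Prop := ∀ (pairs : List (String × String)), Dom_check_typos pairs → Spec_check_typos pairs (check_typos pairs)

-- ===== LEMMAS AND PROOFS =====

theorem pv_climb (k : Nat) (hk : 1 ≤ k) :
    ∀ (i : Nat) (s t : List Char), s.take i ++ s.drop (i + k) = t →
      i < pvPrefLen s t → s.take (i + 1) ++ s.drop (i + 1 + k) = t := by
  intro i
  induction i with
  | zero =>
    intro s t h hi
    match s, t with
    | x :: s', y :: t' =>
      have hxy : x = y := by
        by_contra hne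
        simp [pvPrefLen, hne] at hi
      subst hxy
      simp only [List.take_zero, List.nil_append, Nat.zero_add] at h
      have hd : (x :: s').drop k = s'.drop (k - 1) := by
        conv_lhs => rw [show k = (k - 1) + 1 by omega]
        exact List.drop_succ_cons ..
      rw [hd] at h
      have h2 : (x :: s').drop (0 + 1 + k) = t' := by
        rw [show 0 + 1 + k = (k - 1) + 1 + 1 by omega]
        simp only [List.drop_succ_cons]
        rw [← List.tail_drop, h, List.tail_cons]
      simp [h2]
    | [], t =>
      simp [pvPrefLen] at hi
  | succ j ih =>
    intro s t h hi
    match s, t with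
    | x :: s', y :: t' =>
      have hxy : x = y := by
        by_contra hne
        simp [pvPrefLen, hne] at hi
      subst hxy
      have hi' : j < pvPrefLen s' t' := by
        simpa [pvPrefLen] using hi
      rw [show j + 1 + k = (j + k) + 1 by omega] at h
      simp only [List.take_succ_cons, List.drop_succ_cons, List.cons_append,
        List.cons.injEq, true_and] at h
      have := ih s' t' h hi'
      rw [show j + 1 + 1 + k = (j + 1 + k) + 1 by omega]
      simp only [List.take_succ_cons, List.drop_succ_cons, List.cons_append,
        List.cons.injEq, true_and]
      exact this
    | [], t =>
      simp [pvPrefLen] at hi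

theorem pv_climb_to (s t : List Char) (k : Nat) (hk : 1 ≤ k) :
    ∀ (d i : Nat), pvPrefLen s t - i = d → i ≤ pvPrefLen s t →
      s.take i ++ s.drop (i + k) = t →
      s.take (pvPrefLen s t) ++ s.drop (pvPrefLen s t + k) = t := by
  intro d
  induction d with
  | zero =>
    intro i hd hi h
    have : i = pvPrefLen s t := by omega
    rwa [this] at h
  | succ e ih =>
    intro i hd hi h
    have hlt : i < pvPrefLen s t := by omega
    exact ih (i + 1) (by omega) (by omega) (pv_climb k hk i s t h hlt)

theorem pvPrefLen_le (a : List Char) : ∀ (b : List Char), pvPrefLen a b ≤ a.length ∧ pvPrefLen a b ≤ b.length := by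
  induction a with
  | nil => intro b; cases b <;> simp [pvPrefLen]
  | cons x a' ih =>
    intro b
    cases b with
    | nil => simp [pvPrefLen]
    | cons y b' =>
      by_cases h : x = y <;> simp [pvPrefLen, h]
      constructor
      · exact (ih b').1
      · exact (ih b').2

theorem pvPrefLen_take (a : List Char) : ∀ (b : List Char),
    a.take (pvPrefLen a b) = b.take (pvPrefLen a b) := by
  induction a with
  | nil => intro b; cases b <;> simp [pvPrefLen]
  | cons x a' ih =>
    intro b
    cases b with
    | nil => simp [pvPrefLen]
    | cons y b' =>
      by_cases h : x = y <;> simp [pvPrefLen, h]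
      exact ih b'

theorem le_pvPrefLen (i : Nat) : ∀ (a b : List Char), i ≤ a.length → i ≤ b.length →
    a.take i = b.take i → i ≤ pvPrefLen a b := by
  induction i with
  | zero => intros; omega
  | succ j ih =>
    intro a b ha hb h
    cases a with
    | nil => simp at ha
    | cons x a' =>
      cases b with
      | nil => simp at hb
      | cons y b' =>
        simp [List.take_succ_cons] at h
        obtain ⟨hxy, ht⟩ := h
        simp [pvPrefLen, hxy]
        exact ih a' b' (by simpa using ha) (by simpa using hb) ht

theorem pv_del_iff (s t : List Char) (k : Nat) (hk : 1 ≤ k) (hl : s.length = t.length + k) :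
    ((List.range (t.length + 1)).any (fun i => s.take i ++ s.drop (i + k) == t))
      = (s.drop (pvPrefLen s t + k) == t.drop (pvPrefLen s t)) := by
  apply Bool.eq_iff_iff.mpr
  simp only [List.any_eq_true, List.mem_range, beq_iff_eq]
  constructor
  · rintro ⟨i, hi, hsucc⟩
    have hit : i ≤ t.length := by omega
    have his : i ≤ s.length := by omega
    have htake : s.take i = t.take i := by
      conv_rhs => rw [← hsucc]
      rw [List.take_left' (by simp; omega)]
    have hip : i ≤ pvPrefLen s t := le_pvPrefLen i s t his hit htake
    have hp := pv_climb_to s t k hk (pvPrefLen s t - i) i rfl hip hsucc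
    have h2 := congrArg (List.drop (pvPrefLen s t)) hp
    rw [List.drop_left' (by simp [Nat.min_eq_left (pvPrefLen_le s t).1])] at h2
    exact h2
  · intro h
    refine ⟨pvPrefLen s t, by have := (pvPrefLen_le s t).2; omega, ?_⟩
    rw [h, pvPrefLen_take s t, List.take_append_drop]

theorem pv_mism_count (s : List Char) : ∀ (t : List Char), s.length = t.length →
    ((t.zip s).filter (fun p => p.1 != p.2)).length
      = ((List.range s.length).filter (fun i => s.getD i ' ' != t.getD i ' ')).length := by
  induction s with
  | nil =>
    intro t h
    have : t = [] := List.eq_nil_of_length_eq_zero h.symm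
    subst this; simp
  | cons x s' ih =>
    intro t h
    cases t with
    | nil => simp at h
    | cons y t' =>
      have h' : s'.length = t'.length := by simpa using h
      by_cases hxy : y = x
      · subst hxy
        simp [List.range_succ_eq_map, List.filter_map, Function.comp_def, ih t' h']
      · simp [List.range_succ_eq_map, List.filter_map, Function.comp_def, hxy,
          Ne.symm hxy, ih t' h']

theorem pv_mism_zero (s : List Char) : ∀ (t : List Char), s.length = t.length →
    ((List.range s.length).filter (fun i => s.getD i ' ' != t.getD i ' ')).length = 0 →
    s = t := by
  induction s with
  | nil =>
    intro t h _
    exact (List.eq_nil_of_length_eq_zero h.symm).symm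
  | cons x s' ih =>
    intro t h h0
    cases t with
    | nil => simp at h
    | cons y t' =>
      have h' : s'.length = t'.length := by simpa using h
      by_cases hxy : x = y
      · subst hxy
        simp [List.range_succ_eq_map, List.filter_map, Function.comp_def] at h0
        rw [ih t' h' (by simp [List.length_eq_zero_iff]; exact h0)]
      · exfalso
        simp [List.range_succ_eq_map, hxy] at h0

theorem pv_subst_loop (s : List Char) : ∀ (t : List Char), s.length = t.length →
    ((List.range s.length).filter (fun i => s.getD i ' ' != t.getD i ' ')).length = 1 →
    (List.range t.length).any (fun i => t.set i (s.getD i ' ') == s) = true := by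
  induction s with
  | nil =>
    intro t h h1
    simp at h1
  | cons x s' ih =>
    intro t h h1
    cases t with
    | nil => simp at h
    | cons y t' =>
      have h' : s'.length = t'.length := by simpa using h
      by_cases hxy : x = y
      · subst hxy
        simp only [List.length_cons, List.range_succ_eq_map, List.filter_cons,
          List.getD_cons_zero, bne_self_eq_false, Bool.false_eq_true, if_false,
          List.filter_map, Function.comp_def, List.getD_cons_succ, List.length_map] at h1
        have := ih t' h' (by simpa [Function.comp_def] using h1)
        simp only [List.length_cons, List.range_succ_eq_map, List.any_cons,
          List.any_map, Function.comp_def, List.getD_cons_succ, List.set_cons_succ,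
          List.set_cons_zero, List.cons_beq_cons, beq_self_eq_true, Bool.true_and]
        rw [Bool.or_eq_true]
        right
        simpa [Function.comp_def] using this
      · have hrest : ((List.range s'.length).filter
            (fun i => s'.getD i ' ' != t'.getD i ' ')).length = 0 := by
          simp only [List.length_cons, List.range_succ_eq_map, List.filter_cons,
            List.getD_cons_zero] at h1
          rw [if_pos (by simpa using hxy)] at h1
          simpa [List.filter_map, Function.comp_def] using h1
        have hst : s' = t' := pv_mism_zero s' t' h' hrest
        simp [List.range_succ_eq_map, hst]

theorem pv_swap_eq (s t : List Char) (h : s.length = t.length) :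
    ((List.range (t.length - 1)).any (fun i =>
        ((t.drop i).take 2).reverse == (s.drop i).take 2))
      = ((List.range (s.length - 1)).any (fun i =>
        t.getD i ' ' == s.getD (i + 1) ' ' && t.getD (i + 1) ' ' == s.getD i ' ')) := by
  rw [h]
  apply PySem.List.any_congr_mem
  intro i hi
  rw [List.mem_range] at hi
  have h1t : i + 1 < t.length := by omega
  have h1s : i + 1 < s.length := by omega
  have hdt : t.drop i = t[i] :: t[i+1] :: t.drop (i+2) := by
    rw [List.drop_eq_getElem_cons (by omega), List.drop_eq_getElem_cons h1t]
  have hds : s.drop i = s[i] :: s[i+1] :: s.drop (i+2) := by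
    rw [List.drop_eq_getElem_cons (by omega), List.drop_eq_getElem_cons h1s]
  have hit : i < t.length := by omega
  have his : i < s.length := by omega
  rw [hdt, hds]
  simp only [List.take_succ_cons, List.take_zero, List.reverse_cons, List.reverse_nil,
    List.nil_append, List.cons_append, List.cons_beq_cons,
    List.getD_eq_getElem?_getD, List.getElem?_eq_getElem, h1t, h1s, hit, his,
    Option.getD_some]
  simp [Bool.and_comm]

theorem pv_core_eq (s u : List Char) :
    (pvTdCore s u || pvTdCore u s) = pvOneEdit s u := by
  by_cases hsu : s = u
  · subst hsu; simp [pvTdCore, pvOneEdit]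
  · have hus : ¬ u = s := fun h => hsu h.symm
    by_cases hlen : s.length = u.length
    · -- equal lengths
      have h1 : ((u.zip s).filter (fun p => p.1 != p.2)).length
          = ((List.range s.length).filter (fun i => s.getD i ' ' != u.getD i ' ')).length :=
        pv_mism_count s u hlen
      have h2 : ((s.zip u).filter (fun p => p.1 != p.2)).length
          = ((List.range s.length).filter (fun i => s.getD i ' ' != u.getD i ' ')).length := by
        rw [pv_mism_count u s hlen.symm, ← hlen]
        exact congrArg List.length (List.filter_congr (fun i _ => bne_comm ..))
      simp only [pvTdCore, pvOneEdit, if_neg hsu, if_neg hus, if_pos hlen, if_pos hlen.symm, h1, h2]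
      by_cases hc1 : ((List.range s.length).filter (fun i => s.getD i ' ' != u.getD i ' ')).length = 1
      · simp only [hc1, reduceIte]
        rw [pv_subst_loop s u hlen hc1]
        simp
      · by_cases hc2 : ((List.range s.length).filter (fun i => s.getD i ' ' != u.getD i ' ')).length = 2
        · simp only [hc2, reduceIte]
          rw [pv_swap_eq s u hlen, pv_swap_eq u s hlen.symm]
          have hr : List.range (u.length - 1) = List.range (s.length - 1) := by rw [hlen]
          rw [hr]
          have hpt : ((List.range (s.length - 1)).any fun i =>
              s.getD i ' ' == u.getD (i + 1) ' ' && s.getD (i + 1) ' ' == u.getD i ' ')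
              = ((List.range (s.length - 1)).any fun i =>
              u.getD i ' ' == s.getD (i + 1) ' ' && u.getD (i + 1) ' ' == s.getD i ' ') := by
            apply PySem.List.any_congr_mem
            intro i _
            rw [Bool.and_comm]
            rw [Bool.beq_comm (a := s.getD (i + 1) ' '), Bool.beq_comm (a := s.getD i ' ')]
          rw [hpt]
          simp
        · by_cases hc0 : ((List.range s.length).filter (fun i => s.getD i ' ' != u.getD i ' ')).length = 0
          · exact absurd (pv_mism_zero s u hlen hc0) hsu
          · simp only [if_neg hc1, if_neg hc2]
            rfl
    · -- differing lengths
      by_cases hlt : s.length < u.length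
      · -- u is longer: only typo_detect(u, s) can fire
        by_cases h1 : u.length = s.length + 1
        · simp only [pvTdCore, pvOneEdit, if_neg hsu, if_neg hus, if_neg hlen,
            if_neg (show ¬ u.length = s.length by omega), if_pos hlt,
            if_neg (show ¬ s.length = u.length + 1 by omega),
            if_neg (show ¬ s.length = u.length + 2 by omega), if_pos h1]
          rw [show u.length - s.length = 1 from by omega]
          simp only [Bool.false_or, Nat.reduceLT, reduceIte]
          exact pv_del_iff u s 1 (by omega) h1
        · by_cases h2 : u.length = s.length + 2
          · simp only [pvTdCore, pvOneEdit, if_neg hsu, if_neg hus, if_neg hlen,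
              if_neg (show ¬ u.length = s.length by omega), if_pos hlt,
              if_neg (show ¬ s.length = u.length + 1 by omega),
              if_neg (show ¬ s.length = u.length + 2 by omega), if_neg h1, if_pos h2]
            rw [show u.length - s.length = 2 from by omega]
            simp only [Bool.false_or, Nat.reduceLT, reduceIte]
            exact pv_del_iff u s 2 (by omega) h2
          · simp only [pvTdCore, pvOneEdit, if_neg hsu, if_neg hus, if_neg hlen,
              if_neg (show ¬ u.length = s.length by omega), if_pos hlt,
              if_neg (show ¬ s.length = u.length + 1 by omega),
              if_neg (show ¬ s.length = u.length + 2 by omega), if_neg h1, if_neg h2]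
            rw [if_pos (show 2 < u.length - s.length by omega)]
            simp
      · -- s is longer: only typo_detect(s, u) can fire
        by_cases h1 : s.length = u.length + 1
        · simp only [pvTdCore, pvOneEdit, if_neg hsu, if_neg hus, if_neg hlen,
            if_neg (show ¬ u.length = s.length by omega), if_neg hlt,
            if_neg (show ¬ u.length = s.length + 1 by omega),
            if_neg (show ¬ u.length = s.length + 2 by omega), if_pos h1]
          rw [show s.length - u.length = 1 from by omega]
          simp only [Bool.or_false, Nat.reduceLT, reduceIte]
          exact pv_del_iff s u 1 (by omega) h1
        · by_cases h2 : s.length = u.length + 2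
          · simp only [pvTdCore, pvOneEdit, if_neg hsu, if_neg hus, if_neg hlen,
              if_neg (show ¬ u.length = s.length by omega), if_neg hlt,
              if_neg (show ¬ u.length = s.length + 1 by omega),
              if_neg (show ¬ u.length = s.length + 2 by omega), if_neg h1, if_pos h2]
            rw [show s.length - u.length = 2 from by omega]
            simp only [Bool.or_false, Nat.reduceLT, reduceIte]
            exact pv_del_iff s u 2 (by omega) h2
          · simp only [pvTdCore, pvOneEdit, if_neg hsu, if_neg hus, if_neg hlen,
              if_neg (show ¬ u.length = s.length by omega), if_neg hlt,
              if_neg (show ¬ u.length = s.length + 1 by omega),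
              if_neg (show ¬ u.length = s.length + 2 by omega), if_neg h1, if_neg h2]
            rw [if_pos (show 2 < s.length - u.length by omega)]
            simp

theorem pv_pair_eq (w t : String) :
    pvIsTypo w t
      = pvOneEdit (PySem.Chars.lower w.toList) (PySem.Chars.lower t.toList) := by
  unfold pvIsTypo pvTypoDetect
  exact pv_core_eq _ _

theorem pv_fold_eq (pairs : List (String × String)) :
    ∀ (acc1 : List Bool) (acc2 : List (Option String)),
      pairs.foldl
        (fun acc wt =>
          if pvIsTypo wt.1 wt.2 then (acc.1 ++ [true], acc.2 ++ [some wt.1])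
          else (acc.1 ++ [false], acc.2 ++ [none]))
        (acc1, acc2)
      = (acc1 ++ pairs.map (fun wt => pvIsTypo wt.1 wt.2),
         acc2 ++ pairs.map (fun wt => if pvIsTypo wt.1 wt.2 then some wt.1 else none)) := by
  induction pairs with
  | nil => simp
  | cons wt rest ih =>
    intro acc1 acc2
    simp only [List.foldl_cons, List.map_cons]
    by_cases h : pvIsTypo wt.1 wt.2 <;>
      simp [h, ih, List.append_assoc]

-- ===== VERDICT (by name: the statement is the Claim_ definition above) =====
theorem pv_zip_map (l : List (String × String)) (f : String × String → Bool) :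
    ((l.zip (l.map f)).map (fun pf => if pf.2 then some pf.1.1 else none))
      = l.map (fun x => if f x then some x.1 else none) := by
  induction l with
  | nil => rfl
  | cons x rest ih => simp [ih]

theorem check_typos_spec : Claim_equal_check_typos := by
  intro pairs _
  unfold Spec_check_typos check_typos check_typos_alt
  rw [pv_fold_eq pairs [] []]
  simp only [List.nil_append]
  have hf : (fun (wt : String × String) => pvIsTypo wt.1 wt.2)
      = fun wt => pvOneEdit (PySem.Chars.lower wt.1.toList) (PySem.Chars.lower wt.2.toList) :=
    funext fun wt => pv_pair_eq wt.1 wt.2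
  rw [pv_zip_map, hf]
  congr 1
  apply List.map_congr_left
  intro x _
  rw [pv_pair_eq x.1 x.2]
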